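-- pv_equiv track=rewrite | github.com/FloWide/workbench | backend/workbench_backend/api/routers/webhooks.py | format_string_to_named_regex
-- ===== SOURCE A (Python) =====
-- def format_string_to_named_regex(fmt: str) -> str:
--     pattern = ''
--     i = 0
--     while i < len(fmt):
--         if fmt[i] == '{':
--             j = fmt.index('}', i)
--             varname = fmt[i+1:j]
--             pattern += f'(?P<{varname}>[^.]+)'
--             i = j + 1
--         else:
--             # Escape special regex characters
--             if fmt[i] in r".^$*+?{}[]\|()":
--                 pattern += '\\' + fmt[i]
--             else:
--                 pattern += fmt[i]
--             i += 1
--     return '^' + pattern + '$'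
-- ===== SOURCE B (Python) =====
-- SPECIALS = r".^$*+?{}[]\|()"
--
--
-- def _escape(s: str) -> str:
--     return ''.join('\\' + c if c in SPECIALS else c for c in s)
--
--
-- def format_string_to_named_regex(fmt: str) -> str:
--     head, *parts = fmt.split('{')
--     pieces = [_escape(head)]
--     for part in parts:
--         name, lit = part.split('}', 1)  # ValueError if this '{' is never closed
--         pieces.append(f'(?P<{name}>[^.]+)')
--         pieces.append(_escape(lit))
--     return '^' + ''.join(pieces) + '$'
-- ===== Notes on version B (the rewrite author's own statement) =====
-- stated objective: faster
-- what changed: Replaces A's index-driven while loop (char-by-char cursor building the pattern by repeated string concatenation, with fmt.index for closers) by a split-based decomposition: fmt.split('{') once, each part a 1-bounded split on the closing brace into group name and literal tail, literals escaped by a joined comprehension and all pieces joined once.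
-- outside the precondition, e.g. on format_string_to_named_regex('{a{b}'): A returns '^(?P<a{b>[^.]+)$', B raises ValueError; on format_string_to_named_regex('{'): A raises ValueError, B raises ValueError
import Mathlib
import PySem

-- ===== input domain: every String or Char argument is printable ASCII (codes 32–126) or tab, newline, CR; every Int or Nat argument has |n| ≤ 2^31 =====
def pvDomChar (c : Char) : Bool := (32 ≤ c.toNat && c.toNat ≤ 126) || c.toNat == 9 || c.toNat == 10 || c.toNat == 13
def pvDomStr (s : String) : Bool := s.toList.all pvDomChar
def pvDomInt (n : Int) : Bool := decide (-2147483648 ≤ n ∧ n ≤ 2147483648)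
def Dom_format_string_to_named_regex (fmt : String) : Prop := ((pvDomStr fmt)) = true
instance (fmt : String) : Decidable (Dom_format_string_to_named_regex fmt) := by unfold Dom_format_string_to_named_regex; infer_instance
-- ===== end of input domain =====

-- B replaces A's index-cursor while loop (repeated string concatenation) by a split-on-brace decomposition joined once (measured faster on large inputs).


-- ===== PORT A =====
-- the raw string r".^$*+?{}[]\|()" of special regex characters
def pvSpecials : List Char := ['.', '^', '$', '*', '+', '?', '{', '}', '[', ']', '\\', '|', '(', ')']

-- hand port of `fmt.index('}', i)` relative to the current suffix s = fmt[i:]: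
-- first index of '}' in s (exact for a single-character needle; `none` is Python's ValueError)
def pvIdxClose (s : List Char) : Option Nat := s.idxOf? '}'

-- A's while loop: the state is (pattern, the remaining suffix fmt[i:]); the cursor moves
-- i := j+1 / i := i+1 become drops of the consumed segment.
def pvLoopA (pattern : List Char) (s : List Char) : List Char :=
  match s with
  | [] => pattern
  | c :: rest =>
    if c = '{' then
      match pvIdxClose (c :: rest) with
      | none => pattern          -- fmt.index raises ValueError (outside Pre_)
      | some j =>
        pvLoopA (pattern ++ "(?P<".toList ++ ((c :: rest).drop 1).take (j - 1) ++ ">[^.]+)".toList)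
          ((c :: rest).drop (j + 1))
    else
      pvLoopA (pattern ++ (if c ∈ pvSpecials then ['\\', c] else [c])) rest
termination_by s.length
decreasing_by
  · simp only [List.length_drop, List.length_cons]; omega
  · simp

def format_string_to_named_regex (fmt : String) : String :=
  String.ofList ('^' :: pvLoopA [] fmt.toList ++ ['$'])

-- ===== PORT B =====
-- _escape: ''.join('\\' + c if c in SPECIALS else c for c in s)
def pvEscape (s : List Char) : List Char :=
  (s.map (fun c => if c ∈ pvSpecials then ['\\', c] else [c])).flatten

-- part.split('}', 1): text before the first '}' and the rest; none = the ValueError path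
def pvSplitOnce (part : List Char) : Option (List Char × List Char) :=
  match part.idxOf? '}' with
  | none => none
  | some k => some (part.take k, part.drop (k + 1))

-- the body of B's for-loop over parts, the Option carrying the ValueError path
def pvStepB (acc : Option (List Char)) (part : List Char) : Option (List Char) :=
  acc.bind (fun a => (pvSplitOnce part).map
    (fun nl => a ++ "(?P<".toList ++ nl.1 ++ ">[^.]+)".toList ++ pvEscape nl.2))

def pvCoreB (s : List Char) : List Char :=
  match s.splitOn '{' with
  | [] => []                               -- unreachable: splitOn is never empty
  | head :: parts => (parts.foldl pvStepB (some (pvEscape head))).getD []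

def format_string_to_named_regex_alt (fmt : String) : String :=
  String.ofList ('^' :: pvCoreB fmt.toList ++ ['$'])

-- ===== PRECONDITION & SPEC =====
-- Pre_ excludes formats in which some '{' is not properly closed: either no closing brace
-- follows it (both A and B raise ValueError) or another '{' occurs before the first following
-- closing brace (A returns a group name containing '{' — never a valid regex — while B raises ValueError).
def Pre_format_string_to_named_regex (fmt : String) : Prop :=
  ∀ i < fmt.toList.length, fmt.toList.getD i ' ' = '{' →
    ∃ j < fmt.toList.length, i < j ∧ fmt.toList.getD j ' ' = '}' ∧
      ∀ k < j, i < k → fmt.toList.getD k ' ' ≠ '{'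
instance (fmt : String) : Decidable (Pre_format_string_to_named_regex fmt) := by
  unfold Pre_format_string_to_named_regex; infer_instance

def pvWitness_format_string_to_named_regex : String := "ab.{x}-{y}"

def Spec_format_string_to_named_regex (fmt : String) (out : String) : Prop := out = format_string_to_named_regex_alt fmt
instance (fmt : String) (out : String) : Decidable (Spec_format_string_to_named_regex fmt out) := by unfold Spec_format_string_to_named_regex; infer_instance

-- ===== CLAIM (what is proved, stated in full; the proofs are below) =====
def Claim_equal_format_string_to_named_regex : Prop := ∀ (fmt : String), Dom_format_string_to_named_regex fmt → Pre_format_string_to_named_regex fmt → Spec_format_string_to_named_regex fmt (format_string_to_named_regex fmt)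

-- ===== LEMMAS AND PROOFS =====

-- the precondition as a predicate on a raw character list
def pvOk (s : List Char) : Prop :=
  ∀ i < s.length, s.getD i ' ' = '{' →
    ∃ j < s.length, i < j ∧ s.getD j ' ' = '}' ∧
      ∀ k < j, i < k → s.getD k ' ' ≠ '{'

theorem pre_iff_ok (fmt : String) : Pre_format_string_to_named_regex fmt ↔ pvOk fmt.toList := Iff.rfl

-- B's fold with the error option still visible
def pvFoldB (s : List Char) : Option (List Char) :=
  match s.splitOn '{' with
  | [] => none
  | head :: parts => parts.foldl pvStepB (some (pvEscape head))

theorem coreB_eq_foldB (s : List Char) : pvCoreB s = (pvFoldB s).getD [] := by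
  unfold pvCoreB pvFoldB
  cases s.splitOn '{' <;> rfl

theorem foldB_none (ps : List (List Char)) : ps.foldl pvStepB none = none := by
  induction ps with
  | nil => rfl
  | cons p ps ih => simpa [List.foldl, pvStepB] using ih

theorem fold_shift (ps : List (List Char)) :
    ∀ a b : List Char, ps.foldl pvStepB (some (a ++ b)) = (ps.foldl pvStepB (some b)).map (a ++ ·) := by
  induction ps with
  | nil => intro a b; rfl
  | cons p ps ih =>
    intro a b
    cases hsp : pvSplitOnce p with
    | none => simp [List.foldl, pvStepB, hsp, foldB_none]
    | some nl =>
      simp only [List.foldl, pvStepB, hsp, Option.bind_some, Option.map_some]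
      rw [show a ++ b ++ "(?P<".toList ++ nl.1 ++ ">[^.]+)".toList ++ pvEscape nl.2
            = a ++ (b ++ "(?P<".toList ++ nl.1 ++ ">[^.]+)".toList ++ pvEscape nl.2) by
            simp [List.append_assoc]]
      exact ih a _

theorem idxOf?_first (w t : List Char) (hw : '}' ∉ w) :
    (w ++ '}' :: t).idxOf? '}' = some w.length := by
  induction w with
  | nil => simp [List.idxOf?_cons]
  | cons x w ih =>
    have hx : ¬ (x = '}') := by simp at hw; tauto
    have hw' : '}' ∉ w := by simp at hw; tauto
    simp [List.idxOf?_cons, hx, ih hw']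

theorem splitOn_cons_ne (x : Char) (xs : List Char) (hx : x ≠ '{') :
    (x :: xs).splitOn '{' = (xs.splitOn '{').modifyHead (x :: ·) := by
  simp [List.splitOn, List.splitOnP_cons, hx]

theorem splitOn_cons_sep (xs : List Char) : ('{' :: xs).splitOn '{' = [] :: xs.splitOn '{' := by
  simp [List.splitOn, List.splitOnP_cons]

theorem splitOn_prefix (u v h0 : List Char) (t : List (List Char)) (hu : '{' ∉ u)
    (hv : v.splitOn '{' = h0 :: t) : (u ++ v).splitOn '{' = (u ++ h0) :: t := by
  induction u with
  | nil => simpa using hv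
  | cons x u ih =>
    have hx : x ≠ '{' := by simp at hu; tauto
    have hu' : '{' ∉ u := by simp at hu; tauto
    rw [List.cons_append, splitOn_cons_ne x _ hx, ih hu']
    rfl

theorem ok_suffix (a s : List Char) (h : pvOk (a ++ s)) : pvOk s := by
  intro i hi hc
  have h1 : (a ++ s).getD (a.length + i) ' ' = '{' := by
    rw [List.getD_append_right a s ' ' _ (by omega)]
    simpa using hc
  obtain ⟨j, hj, hij, hjc, hk⟩ := h (a.length + i) (by simp; omega) h1
  simp only [List.length_append] at hj
  refine ⟨j - a.length, by omega, by omega, ?_, ?_⟩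
  · rw [List.getD_append_right a s ' ' j (by omega)] at hjc
    exact hjc
  · intro k hk' hik
    have h2 := hk (a.length + k) (by omega) (by omega)
    rw [List.getD_append_right a s ' ' _ (by omega)] at h2
    simpa using h2

theorem ok_head (rest : List Char) (h : pvOk ('{' :: rest)) :
    ∃ w t, rest = w ++ '}' :: t ∧ '{' ∉ w ∧ '}' ∉ w := by
  obtain ⟨j, hj, hij, hjc, hk⟩ := h 0 (by simp) (by simp)
  simp only [List.length_cons] at hj
  have hjl : j - 1 < rest.length := by omega
  have hjr : rest[j - 1]'hjl = '}' := by
    cases j with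
    | zero => omega
    | succ j' =>
      have h5 := hjc
      rw [List.getD_cons_succ, List.getD_eq_getElem _ _ (show j' < rest.length by omega)] at h5
      simpa using h5
  have hmem : '}' ∈ rest := List.mem_iff_getElem.mpr ⟨j - 1, hjl, hjr⟩
  rcases hix : rest.idxOf? '}' with _ | k
  · exact absurd (List.idxOf?_eq_none_iff.mp hix) (by simpa using hmem)
  obtain ⟨hkl, hkc, hkfirst⟩ := List.idxOf?_eq_some_iff.mp hix
  have hkj : k ≤ j - 1 := by
    by_contra hlt
    exact hkfirst (j - 1) (by omega) hjr
  refine ⟨rest.take k, rest.drop (k + 1), ?_, ?_, ?_⟩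
  · conv_lhs => rw [← List.take_append_drop k rest, List.drop_eq_getElem_cons hkl, hkc]
  · intro hmemw
    obtain ⟨m, hm, hmc⟩ := List.mem_iff_getElem.mp hmemw
    simp only [List.length_take] at hm
    have hm' : m < k := by omega
    have hrm : rest[m]'(by omega) = '{' := by
      simpa [List.getElem_take] using hmc
    have := hk (m + 1) (by omega) (by omega)
    rw [List.getD_cons_succ, List.getD_eq_getElem _ _ (by omega)] at this
    exact this hrm
  · intro hmemw
    obtain ⟨m, hm, hmc⟩ := List.mem_iff_getElem.mp hmemw
    simp only [List.length_take] at hm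
    exact hkfirst m (by omega) (by simpa [List.getElem_take] using hmc)

theorem pvMain (n : Nat) : ∀ s : List Char, s.length ≤ n → pvOk s →
    ∃ r, pvFoldB s = some r ∧ ∀ acc, pvLoopA acc s = acc ++ r := by
  induction n with
  | zero =>
    intro s hs _
    have hnil : s = [] := by cases s with | nil => rfl | cons a l => simp at hs
    subst hnil
    exact ⟨[], by simp [pvFoldB, pvEscape], fun acc => by simp [pvLoopA]⟩
  | succ n ih =>
    intro s hs hok
    match s with
    | [] => exact ⟨[], by simp [pvFoldB, pvEscape], fun acc => by simp [pvLoopA]⟩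
    | c :: rest =>
      by_cases hc : c = '{'
      · subst hc
        obtain ⟨w, t, hrest, hw1, hw2⟩ := ok_head rest hok
        have hokt : pvOk t := by
          apply ok_suffix ('{' :: (w ++ ['}']))
          have : ('{' :: (w ++ ['}'])) ++ t = '{' :: rest := by simp [hrest]
          rw [this]; exact hok
        have hlen : t.length ≤ n := by
          subst hrest; simp at hs ⊢; omega
        obtain ⟨r', hfold', hloop'⟩ := ih t hlen hokt
        obtain ⟨t0, ps, hsplit⟩ : ∃ t0 ps, t.splitOn '{' = t0 :: ps := by
          rcases hh : t.splitOn '{' with _ | ⟨a, b⟩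
          · exact absurd hh (List.splitOnP_ne_nil _ t)
          · exact ⟨a, b, rfl⟩
        have hfold2 : ps.foldl pvStepB (some (pvEscape t0)) = some r' := by
          unfold pvFoldB at hfold'; rw [hsplit] at hfold'; exact hfold'
        have hidx : pvIdxClose ('{' :: rest) = some (w.length + 1) := by
          unfold pvIdxClose
          rw [hrest, List.idxOf?_cons]
          simp [idxOf?_first w t hw2]
        have htake : (('{' :: rest).drop 1).take (w.length + 1 - 1) = w := by
          simp [hrest]
        have hdrop : ('{' :: rest).drop (w.length + 1 + 1) = t := by
          have : rest = (w ++ ['}']) ++ t := by simp [hrest]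
          rw [List.drop_succ_cons, this,
            show w.length + 1 = (w ++ ['}']).length by simp, List.drop_left]
        refine ⟨"(?P<".toList ++ w ++ ">[^.]+)".toList ++ r', ?_, ?_⟩
        · unfold pvFoldB
          have hrest' : rest = (w ++ ['}']) ++ t := by simp [hrest]
          rw [splitOn_cons_sep, hrest', splitOn_prefix (w ++ ['}']) t t0 ps (by simp [hw1]) hsplit]
          have hsp : pvSplitOnce (w ++ ['}'] ++ t0) = some (w, t0) := by
            unfold pvSplitOnce
            rw [show w ++ ['}'] ++ t0 = w ++ '}' :: t0 by simp, idxOf?_first w t0 hw2]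
            have h1 : (w ++ '}' :: t0).take w.length = w := List.take_left
            have h2 : (w ++ '}' :: t0).drop (w.length + 1) = t0 := by
              rw [show w ++ '}' :: t0 = (w ++ ['}']) ++ t0 by simp,
                show w.length + 1 = (w ++ ['}']).length by simp, List.drop_left]
            simp [h1, h2]
          simp only [List.foldl, pvStepB, Option.bind_some, hsp, Option.map_some]
          rw [show pvEscape [] ++ "(?P<".toList ++ w ++ ">[^.]+)".toList ++ pvEscape t0
                = ("(?P<".toList ++ w ++ ">[^.]+)".toList) ++ pvEscape t0 by simp [pvEscape],
            fold_shift ps _ (pvEscape t0), hfold2]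
          simp [List.append_assoc]
        · intro acc
          rw [pvLoopA]
          simp only [hidx, htake, hdrop]
          rw [hloop']
          simp [List.append_assoc]
      · have hokr : pvOk rest := ok_suffix [c] rest (by simpa using hok)
        obtain ⟨r', hfold', hloop'⟩ := ih rest (by simp at hs; omega) hokr
        obtain ⟨h0, ps, hsplit⟩ : ∃ h0 ps, rest.splitOn '{' = h0 :: ps := by
          rcases hh : rest.splitOn '{' with _ | ⟨a, b⟩
          · exact absurd hh (List.splitOnP_ne_nil _ rest)
          · exact ⟨a, b, rfl⟩
        have hfold2 : ps.foldl pvStepB (some (pvEscape h0)) = some r' := by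
          unfold pvFoldB at hfold'; rw [hsplit] at hfold'; exact hfold'
        refine ⟨(if c ∈ pvSpecials then ['\\', c] else [c]) ++ r', ?_, ?_⟩
        · unfold pvFoldB
          rw [splitOn_cons_ne c rest hc, hsplit]
          simp only [List.modifyHead]
          rw [show pvEscape (c :: h0)
                = (if c ∈ pvSpecials then ['\\', c] else [c]) ++ pvEscape h0 by simp [pvEscape],
            fold_shift ps _ (pvEscape h0), hfold2]
          rfl
        · intro acc
          rw [pvLoopA]
          simp only [if_neg hc]
          rw [hloop']
          simp [List.append_assoc]

-- ===== VERDICT (by name: the statement is the Claim_ definition above) =====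
theorem format_string_to_named_regex_spec : Claim_equal_format_string_to_named_regex := by
  intro fmt _ hpre
  unfold Spec_format_string_to_named_regex
  unfold format_string_to_named_regex format_string_to_named_regex_alt
  obtain ⟨r, hfold, hloop⟩ :=
    pvMain fmt.toList.length fmt.toList le_rfl ((pre_iff_ok fmt).mp hpre)
  rw [hloop [], coreB_eq_foldB, hfold]
  rfl
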